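-- pv_equiv track=rewrite | github.com/jonnyallred/boardgame-rules | scripts/rebuild_index.py | build_index
-- ===== SOURCE A (Python) =====
-- from collections import defaultdict
--
-- HEADER_TEMPLATE = """\
-- ---
-- title: Board Game Rules
-- layout: home
-- ---
--
-- # Board Game Rules
--
-- AI-friendly rules summaries for board games. Use these with **Claude**, **ChatGPT**, or any AI assistant to get instant rules answers — including via voice.
--
-- ## How to Use
--
-- ### With Claude (voice or text)
--
-- Start a conversation with Claude and paste this prompt:
--
-- ```
-- You are a board game rules expert. I'll ask you questions about board games.
-- When I mention a game, fetch its rules from: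
-- https://jonnyallred.github.io/boardgame-rules/rules/{{slug}}/
-- where {{slug}} is the game name in lowercase with hyphens (e.g., "ark-nova", "blood-on-the-clocktower").
--
-- The full list of available games is at:
-- https://jonnyallred.github.io/boardgame-rules/
--
-- Answer conversationally. Cite specific rules when relevant.
-- If a game isn't available, say so and offer general advice.
-- ```
--
-- Then just ask questions — "How does trading work in Catan?" or "What happens when you run out of cards in Arcs?"
--
-- **For voice:** Paste the prompt into a Claude conversation on the mobile app, then switch to voice mode. Claude will remember the instructions and you can ask rules questions hands-free at the table.
--
-- ### With ChatGPT, Gemini, or other assistants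
--
-- The same prompt works — any AI assistant that can fetch web pages will pull the rules on demand.
--
-- ---
--
-- ## Available Games
--
-- """
--
-- TABLE_HEADER = """\
-- | Game | Players | Time | Designer |
-- |------|---------|------|----------|
-- """
--
-- def group_by_letter(entries: list[tuple[str, str, str, str, str]]) -> dict[str, list]:
--     """Group entries by first letter (digits go into '0-9')."""
--     groups: dict[str, list] = defaultdict(list)
--     for e in entries:
--         first = e[0].lstrip("'\"")[0].upper()
--         if first.isdigit():
--             groups["0-9"].append(e)
--         else:
--             groups[first].append(e)
--     return dict(groups)
--
-- def build_index(entries: list[tuple[str, str, str, str, str]]) -> str: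
--     """Build the complete index.md content."""
--     groups = group_by_letter(entries)
--     letters = sorted(groups.keys(), key=lambda x: ("0" if x == "0-9" else x))
--
--     lines = [HEADER_TEMPLATE]
--
--     # Letter navigation
--     nav_parts = [f"[{letter}](#{letter.lower() if letter != '0-9' else '0-9'})" for letter in letters]
--     lines.append(" | ".join(nav_parts) + "\n\n")
--
--     # Each section
--     for letter in letters:
--         anchor = letter.lower() if letter != "0-9" else "0-9"
--         lines.append(f"### {letter} {{{anchor}}}\n\n")
--         lines.append(TABLE_HEADER)
--         for title, slug, pc, pt, designer in groups[letter]: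
--             lines.append(f"| [{title}](rules/{slug}/) | {pc} | {pt} | {designer} |\n")
--         lines.append("\n")
--
--     return "".join(lines)
-- ===== SOURCE B (Python) =====
-- HEADER_TEMPLATE = """\
-- ---
-- title: Board Game Rules
-- layout: home
-- ---
--
-- # Board Game Rules
--
-- AI-friendly rules summaries for board games. Use these with **Claude**, **ChatGPT**, or any AI assistant to get instant rules answers — including via voice.
--
-- ## How to Use
--
-- ### With Claude (voice or text)
--
-- Start a conversation with Claude and paste this prompt:
--
-- ```
-- You are a board game rules expert. I'll ask you questions about board games.
-- When I mention a game, fetch its rules from: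
-- https://jonnyallred.github.io/boardgame-rules/rules/{{slug}}/
-- where {{slug}} is the game name in lowercase with hyphens (e.g., "ark-nova", "blood-on-the-clocktower").
--
-- The full list of available games is at:
-- https://jonnyallred.github.io/boardgame-rules/
--
-- Answer conversationally. Cite specific rules when relevant.
-- If a game isn't available, say so and offer general advice.
-- ```
--
-- Then just ask questions — "How does trading work in Catan?" or "What happens when you run out of cards in Arcs?"
--
-- **For voice:** Paste the prompt into a Claude conversation on the mobile app, then switch to voice mode. Claude will remember the instructions and you can ask rules questions hands-free at the table.
--
-- ### With ChatGPT, Gemini, or other assistants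
--
-- The same prompt works — any AI assistant that can fetch web pages will pull the rules on demand.
--
-- ---
--
-- ## Available Games
--
-- """
--
-- TABLE_HEADER = """\
-- | Game | Players | Time | Designer |
-- |------|---------|------|----------|
-- """
--
-- def _letter(e):
--     """Section letter of an entry: first non-quote char upper-cased, digits -> '0-9'."""
--     first = e[0].lstrip("'\"")[0].upper()
--     return "0-9" if first.isdigit() else first
--
-- def build_index(entries: list[tuple[str, str, str, str, str]]) -> str:
--     """Build the complete index.md content (no dict: distinct letters + per-letter scans)."""
--     seen = []
--     for e in entries:
--         l = _letter(e)
--         if l not in seen: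
--             seen.append(l)
--     letters = sorted(seen, key=lambda x: "0" if x == "0-9" else x)
--
--     out = HEADER_TEMPLATE
--     out += " | ".join(f"[{l}](#{l.lower() if l != '0-9' else '0-9'})" for l in letters) + "\n\n"
--     for l in letters:
--         anchor = l.lower() if l != "0-9" else "0-9"
--         out += f"### {l} {{{anchor}}}\n\n" + TABLE_HEADER
--         for e in entries:
--             if _letter(e) == l:
--                 title, slug, pc, pt, designer = e
--                 out += f"| [{title}](rules/{slug}/) | {pc} | {pt} | {designer} |\n"
--         out += "\n"
--     return out
-- ===== Notes on version B (the rewrite author's own statement) =====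
-- stated objective: simpler
-- what changed: Drops the defaultdict grouping: B collects the distinct section letters in first-occurrence order, sorts them, and renders each section by a per-letter scan of the entries, concatenating the output string directly instead of joining a list of lines.
import Mathlib
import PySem

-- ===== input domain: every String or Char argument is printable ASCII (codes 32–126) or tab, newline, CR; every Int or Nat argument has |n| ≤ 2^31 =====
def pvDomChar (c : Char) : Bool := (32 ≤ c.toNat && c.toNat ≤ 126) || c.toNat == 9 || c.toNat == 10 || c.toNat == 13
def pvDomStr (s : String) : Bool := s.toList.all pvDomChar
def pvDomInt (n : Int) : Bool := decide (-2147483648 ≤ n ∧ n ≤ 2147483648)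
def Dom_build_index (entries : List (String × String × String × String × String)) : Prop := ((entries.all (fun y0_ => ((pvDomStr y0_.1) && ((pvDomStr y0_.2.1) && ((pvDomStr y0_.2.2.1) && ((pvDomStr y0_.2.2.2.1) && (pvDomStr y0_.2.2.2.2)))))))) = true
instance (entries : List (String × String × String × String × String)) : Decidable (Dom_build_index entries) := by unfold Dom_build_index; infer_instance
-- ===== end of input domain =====

-- B drops the defaultdict grouping: it collects the distinct section letters in first-occurrence order,
-- sorts them, and emits each section by a per-letter scan over the entries (objective: simpler, no dict).

def pvHeader : String := "---\ntitle: Board Game Rules\nlayout: home\n---\n\n# Board Game Rules\n\nAI-friendly rules summaries for board games. Use these with **Claude**, **ChatGPT**, or any AI assistant to get instant rules answers — including via voice.\n\n## How to Use\n\n### With Claude (voice or text)\n\nStart a conversation with Claude and paste this prompt:\n\n```\nYou are a board game rules expert. I'll ask you questions about board games.\nWhen I mention a game, fetch its rules from:\nhttps://jonnyallred.github.io/boardgame-rules/rules/{{slug}}/\nwhere {{slug}} is the game name in lowercase with hyphens (e.g., \"ark-nova\", \"blood-on-the-clocktower\").\n\nThe full list of available games is at:\nhttps://jonnyallred.github.io/boardgame-rules/\n\nAnswer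 conversationally. Cite specific rules when relevant.\nIf a game isn't available, say so and offer general advice.\n```\n\nThen just ask questions — \"How does trading work in Catan?\" or \"What happens when you run out of cards in Arcs?\"\n\n**For voice:** Paste the prompt into a Claude conversation on the mobile app, then switch to voice mode. Claude will remember the instructions and you can ask rules questions hands-free at the table.\n\n### With ChatGPT, Gemini, or other assistants\n\nThe same prompt works — any AI assistant that can fetch web pages will pull the rules on demand.\n\n---\n\n## Available Games\n\n"

def pvTableHeader : String := "| Game | Players | Time | Designer |\n|------|---------|------|----------|\n"

-- ===== PORT A =====
-- group_by_letter: for e in entries: groups[first-letter].append(e)  (defaultdict(list) = Dict.modify with default []).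
-- e[0].lstrip("'\"") is ported by hand as toList.dropWhile (exact: lstrip(chars) drops leading chars of the set);
-- [0] is PySem.List.pyGet? (none = IndexError, excluded by Pre_build_index; the port then leaves groups unchanged).
def group_by_letter (entries : List (String × String × String × String × String)) :
    PySem.Dict String (List (String × String × String × String × String)) :=
  entries.foldl (fun groups e =>
    match PySem.List.pyGet? (e.1.toList.dropWhile (fun c => c == '\'' || c == '"')) 0 with
    | none => groups   -- Python raises IndexError here; outside Pre_build_index
    | some c =>
      let first := PySem.Chars.upperChar c
      if PySem.Chars.isdigit first then groups.modify "0-9" [] (· ++ [e])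
      else groups.modify (String.ofList [first]) [] (· ++ [e])) PySem.Dict.empty

-- groups[letter] is ported as getD letter [] (exact here: letter always comes from groups.keys).
def build_index (entries : List (String × String × String × String × String)) : String :=
  let groups := group_by_letter entries
  let letters := PySem.List.sorted groups.keys (fun x => if x = "0-9" then "0" else x)
  let lines : List String := [pvHeader]
  let nav_parts := letters.map (fun letter =>
    "[" ++ letter ++ "](#" ++ (if letter != "0-9" then PySem.Str.lower letter else "0-9") ++ ")")
  let lines := lines ++ [PySem.Str.join " | " nav_parts ++ "\n\n"]
  let lines := letters.foldl (fun lines letter =>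
    let anchor := if letter != "0-9" then PySem.Str.lower letter else "0-9"
    let lines := lines ++ ["### " ++ letter ++ " {" ++ anchor ++ "}\n\n"]
    let lines := lines ++ [pvTableHeader]
    let lines := (groups.getD letter []).foldl (fun lines e =>
      lines ++ ["| [" ++ e.1 ++ "](rules/" ++ e.2.1 ++ "/) | " ++ e.2.2.1 ++ " | " ++ e.2.2.2.1 ++ " | " ++ e.2.2.2.2 ++ " |\n"]) lines
    lines ++ ["\n"]) lines
  PySem.Str.join "" lines

-- ===== PORT B =====
-- _letter(e): Option String, none = IndexError (outside Pre_build_index).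
def pvLetter? (e : String × String × String × String × String) : Option String :=
  (PySem.List.pyGet? (e.1.toList.dropWhile (fun c => c == '\'' || c == '"')) 0).map (fun c =>
    let first := PySem.Chars.upperChar c
    if PySem.Chars.isdigit first then "0-9" else String.ofList [first])

def build_index_alt (entries : List (String × String × String × String × String)) : String :=
  let seen := entries.foldl (fun seen e =>
    match pvLetter? e with
    | none => seen   -- Python raises IndexError here; outside Pre_build_index
    | some l => if l ∈ seen then seen else seen ++ [l]) []
  let letters := PySem.List.sorted seen (fun x => if x = "0-9" then "0" else x)
  let out := pvHeader
  let out := out ++ PySem.Str.join " | " (letters.map (fun l =>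
    "[" ++ l ++ "](#" ++ (if l != "0-9" then PySem.Str.lower l else "0-9") ++ ")")) ++ "\n\n"
  let out := letters.foldl (fun out l =>
    let anchor := if l != "0-9" then PySem.Str.lower l else "0-9"
    let out := out ++ "### " ++ l ++ " {" ++ anchor ++ "}\n\n" ++ pvTableHeader
    let out := entries.foldl (fun out e =>
      if pvLetter? e == some l then
        out ++ "| [" ++ e.1 ++ "](rules/" ++ e.2.1 ++ "/) | " ++ e.2.2.1 ++ " | " ++ e.2.2.2.1 ++ " | " ++ e.2.2.2.2 ++ " |\n"
      else out) out
    out ++ "\n") out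
  out

-- ===== PRECONDITION & SPEC =====
-- Pre_ excludes entries whose title is empty or consists only of ' and " characters: there
-- e[0].lstrip("'\"")[0] raises IndexError in A (and in B alike).
def Pre_build_index (entries : List (String × String × String × String × String)) : Prop :=
  ∀ e ∈ entries, e.1.toList.dropWhile (fun c => c == '\'' || c == '"') ≠ []
instance (entries : List (String × String × String × String × String)) : Decidable (Pre_build_index entries) := by
  unfold Pre_build_index; infer_instance
def pvWitness_build_index : (List (String × String × String × String × String)) :=
  [("Catan", "catan", "3-4", "60-120", "Klaus Teuber"), ("7 Wonders", "7-wonders", "2-7", "30", "Antoine Bauza")]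

def Spec_build_index (entries : List (String × String × String × String × String)) (out : String) : Prop :=
  out = build_index_alt entries
instance (entries : List (String × String × String × String × String)) (out : String) : Decidable (Spec_build_index entries out) := by
  unfold Spec_build_index; infer_instance

-- ===== CLAIM (what is proved, stated in full; the proofs are below) =====
def Claim_equal_build_index : Prop := ∀ (entries : List (String × String × String × String × String)), Dom_build_index entries → Pre_build_index entries → Spec_build_index entries (build_index entries)

-- ===== LEMMAS AND PROOFS =====

-- total letter function used by the proofs (agrees with pvLetter? on Pre_)
def pvLet (e : String × String × String × String × String) : String := (pvLetter? e).getD ""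

theorem pvLetter?_eq_some {e : String × String × String × String × String}
    (h : e.1.toList.dropWhile (fun c => c == '\'' || c == '"') ≠ []) :
    pvLetter? e = some (pvLet e) := by
  unfold pvLet pvLetter?
  cases hg : PySem.List.pyGet? (e.1.toList.dropWhile (fun c => c == '\'' || c == '"')) 0 with
  | none =>
    exfalso
    cases hl : e.1.toList.dropWhile (fun c => c == '\'' || c == '"') with
    | nil => exact h hl
    | cons a t => rw [hl] at hg; simp at hg
  | some c => simp

theorem group_by_letter_eq (entries : List (String × String × String × String × String))
    (h : Pre_build_index entries) :
    group_by_letter entries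
      = entries.foldl (fun d e => d.modify (pvLet e) [] (· ++ [e])) PySem.Dict.empty := by
  unfold group_by_letter
  apply PySem.List.foldl_congr_mem
  intro acc e he
  have := pvLetter?_eq_some (h e he)
  unfold pvLetter? at this
  cases hg : PySem.List.pyGet? (e.1.toList.dropWhile (fun c => c == '\'' || c == '"')) 0 with
  | none => rw [hg] at this; simp at this
  | some c =>
    rw [hg] at this
    simp only [Option.map_some, Option.some.injEq] at this
    simp only
    split
    · rename_i hd
      rw [← this]; simp only [hd, if_pos]
    · rename_i hd
      rw [← this]
      simp only [Bool.not_eq_true] at hd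
      simp [hd]

theorem getD_group (entries : List (String × String × String × String × String))
    (h : Pre_build_index entries) (l : String) :
    (group_by_letter entries).getD l []
      = entries.filter (fun e => pvLet e == l) := by
  rw [group_by_letter_eq entries h]
  have hm : entries.foldl (fun d e => d.modify (pvLet e) [] (· ++ [e])) PySem.Dict.empty
      = (entries.map (fun e => (pvLet e, e))).foldl (fun d p => d.modify p.1 [] (· ++ [p.2])) PySem.Dict.empty := by
    rw [List.foldl_map]
  rw [hm, PySem.Dict.getD_foldl_modify_append]
  simp [List.filter_map, Function.comp_def]

theorem keys_group (entries : List (String × String × String × String × String))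
    (h : Pre_build_index entries) :
    (group_by_letter entries).keys
      = (entries.map pvLet).foldl PySem.Set.add [] := by
  rw [group_by_letter_eq entries h]
  rw [PySem.Dict.keys_foldl_modify_key entries pvLet [] (fun _ e => (· ++ [e]))]
  simp [PySem.Set.update]

theorem seen_eq (entries : List (String × String × String × String × String))
    (h : Pre_build_index entries) :
    entries.foldl (fun seen e =>
        match pvLetter? e with
        | none => seen
        | some l => if l ∈ seen then seen else seen ++ [l]) []
      = (entries.map pvLet).foldl PySem.Set.add [] := by
  rw [List.foldl_map]
  apply PySem.List.foldl_congr_mem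
  intro acc e he
  rw [pvLetter?_eq_some (h e he)]
  by_cases hm : pvLet e ∈ acc
  · simp [PySem.Set.add, hm]
  · simp [PySem.Set.add, hm]

-- flatten view of join ""
theorem join_nil_eq_flatten (ls : List (List Char)) :
    PySem.Chars.join [] ls = ls.flatten := by
  induction ls with
  | nil => simp [PySem.Chars.join_nil]
  | cons a t ih =>
    cases t with
    | nil => simp [PySem.Chars.join_singleton]
    | cons b r => rw [PySem.Chars.join_cons_cons]; simp_all

-- the accumulator invariant: flatten of A's lines = toList of B's out
def pvInv (lines : List String) (out : String) : Prop :=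
  (lines.map String.toList).flatten = out.toList

theorem pvInv_append (lines : List String) (out : String) (s : String)
    (h : pvInv lines out) : pvInv (lines ++ [s]) (out ++ s) := by
  unfold pvInv at *
  simp [String.toList_append, h]

-- inner row loop: A folds over the filtered group, B filters inside a fold over all entries
theorem inner_eq (l : String) (es : List (String × String × String × String × String))
    (h : ∀ e ∈ es, e.1.toList.dropWhile (fun c => c == '\'' || c == '"') ≠ [])
    (lines : List String) (out : String) (hinv : pvInv lines out) :
    pvInv ((es.filter (fun e => pvLet e == l)).foldl (fun lines e =>
            lines ++ ["| [" ++ e.1 ++ "](rules/" ++ e.2.1 ++ "/) | " ++ e.2.2.1 ++ " | " ++ e.2.2.2.1 ++ " | " ++ e.2.2.2.2 ++ " |\n"]) lines)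
          (es.foldl (fun out e =>
            if pvLetter? e == some l then
              out ++ "| [" ++ e.1 ++ "](rules/" ++ e.2.1 ++ "/) | " ++ e.2.2.1 ++ " | " ++ e.2.2.2.1 ++ " | " ++ e.2.2.2.2 ++ " |\n"
            else out) out) := by
  induction es generalizing lines out with
  | nil => simpa using hinv
  | cons e t ih =>
    have he := pvLetter?_eq_some (h e (by simp))
    have ht : ∀ e' ∈ t, e'.1.toList.dropWhile (fun c => c == '\'' || c == '"') ≠ [] :=
      fun e' he' => h e' (by simp [he'])
    by_cases hc : pvLet e = l
    · have h1 : (pvLet e == l) = true := by simp [hc]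
      have h2 : (pvLetter? e == some l) = true := by rw [he]; simp [hc]
      simp only [List.filter_cons, h1, if_pos, List.foldl_cons, h2]
      apply ih ht
      unfold pvInv at *
      simp [String.toList_append, hinv]
    · have h1 : (pvLet e == l) = false := by simp [hc]
      have h2 : (pvLetter? e == some l) = false := by rw [he]; simp [hc]
      simp only [List.filter_cons, h1, Bool.false_eq_true, if_neg, List.foldl_cons, h2,
        not_false_eq_true]
      exact ih ht _ _ hinv

-- outer section loop
theorem outer_eq (entries : List (String × String × String × String × String))
    (h : Pre_build_index entries) (letters : List String)
    (lines : List String) (out : String) (hinv : pvInv lines out) :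
    pvInv
      (letters.foldl (fun lines letter =>
        let anchor := if letter != "0-9" then PySem.Str.lower letter else "0-9"
        let lines := lines ++ ["### " ++ letter ++ " {" ++ anchor ++ "}\n\n"]
        let lines := lines ++ [pvTableHeader]
        let lines := ((group_by_letter entries).getD letter []).foldl (fun lines e =>
          lines ++ ["| [" ++ e.1 ++ "](rules/" ++ e.2.1 ++ "/) | " ++ e.2.2.1 ++ " | " ++ e.2.2.2.1 ++ " | " ++ e.2.2.2.2 ++ " |\n"]) lines
        lines ++ ["\n"]) lines)
      (letters.foldl (fun out l =>
        let anchor := if l != "0-9" then PySem.Str.lower l else "0-9"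
        let out := out ++ "### " ++ l ++ " {" ++ anchor ++ "}\n\n" ++ pvTableHeader
        let out := entries.foldl (fun out e =>
          if pvLetter? e == some l then
            out ++ "| [" ++ e.1 ++ "](rules/" ++ e.2.1 ++ "/) | " ++ e.2.2.1 ++ " | " ++ e.2.2.2.1 ++ " | " ++ e.2.2.2.2 ++ " |\n"
          else out) out
        out ++ "\n") out) := by
  induction letters generalizing lines out with
  | nil => simpa using hinv
  | cons l ls ih =>
    simp only [List.foldl_cons]
    apply ih
    have hstep : pvInv
        ((lines ++ ["### " ++ l ++ " {" ++ (if l != "0-9" then PySem.Str.lower l else "0-9") ++ "}\n\n"]) ++ [pvTableHeader])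
        (out ++ "### " ++ l ++ " {" ++ (if l != "0-9" then PySem.Str.lower l else "0-9") ++ "}\n\n" ++ pvTableHeader) := by
      unfold pvInv at *
      simp [String.toList_append, hinv]
    have hrows := inner_eq l entries h _ _ hstep
    rw [getD_group entries h l]
    exact pvInv_append _ _ "\n" hrows

-- ===== VERDICT (by name: the statement is the Claim_ definition above) =====
set_option maxHeartbeats 1000000 in
theorem build_index_spec : Claim_equal_build_index := by
  intro entries _ hpre
  unfold Spec_build_index build_index build_index_alt
  rw [seen_eq entries hpre, ← keys_group entries hpre]
  apply String.toList_inj.mp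
  rw [PySem.Str.toList_join]
  have hnil : ("" : String).toList = [] := rfl
  rw [hnil, join_nil_eq_flatten]
  have start : pvInv
      ([pvHeader] ++ [PySem.Str.join " | " ((PySem.List.sorted (group_by_letter entries).keys (fun x => if x = "0-9" then "0" else x)).map (fun letter =>
        "[" ++ letter ++ "](#" ++ (if letter != "0-9" then PySem.Str.lower letter else "0-9") ++ ")")) ++ "\n\n"])
      (pvHeader ++ PySem.Str.join " | " ((PySem.List.sorted (group_by_letter entries).keys (fun x => if x = "0-9" then "0" else x)).map (fun l =>
        "[" ++ l ++ "](#" ++ (if l != "0-9" then PySem.Str.lower l else "0-9") ++ ")")) ++ "\n\n") := by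
    unfold pvInv
    simp [String.toList_append]
  exact outer_eq entries hpre _ _ _ start
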